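-- pv_equiv track=rewrite | github.com/LoPA607/logistic-regression | pathplan_04.py | zigzag_raster_scan
-- ===== SOURCE A (Python) =====
-- from collections import defaultdict
--
-- def zigzag_raster_scan(nodes):
--     # Step 1: Sort nodes by x first, then y to prioritize vertical sorting
--     nodes.sort(key=lambda node: (node[0], node[1]))
--
--     # Step 2: Group nodes by their x-coordinate (vertical rows)
--     columns = defaultdict(list)
--     for x, y in nodes:
--         columns[x].append((x, y))
--
--     # Step 3: Create the zig-zag path for vertical scanning
--     zigzag_path = []
--     for i, (x, col_nodes) in enumerate(sorted(columns.items())):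
--         # Reverse every other column to create zig-zag vertically
--         if i % 2 == 1:
--             col_nodes = col_nodes[::-1]
--         zigzag_path.extend(col_nodes)
--
--     return zigzag_path
-- ===== SOURCE B (Python) =====
-- def zigzag_raster_scan(nodes):
--     # Same in-place sort as A (side effect on `nodes` preserved).
--     nodes.sort(key=lambda node: (node[0], node[1]))
--
--     # Different algorithm: no grouping, no reversal, no concatenation.
--     # Columns at an odd rank (among the sorted distinct x values) are traversed
--     # top-down, which is exactly ascending x with y negated there; so the whole
--     # zig-zag path is one sort of the nodes under that comparison key.
--     xs = sorted({x for x, y in nodes})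
--     odd = {x: i % 2 for i, x in enumerate(xs)}
--     return sorted(nodes, key=lambda n: (n[0], -n[1] if odd[n[0]] else n[1]))
-- ===== Notes on version B (the rewrite author's own statement) =====
-- stated objective: alternative
-- what changed: Replaces A's group-by-column table, per-column reversal and concatenation by a single comparison-key sort: the zig-zag path is sorted(nodes, key=(x, -y if the rank of x among the distinct columns is odd else y)).
import Mathlib
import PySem

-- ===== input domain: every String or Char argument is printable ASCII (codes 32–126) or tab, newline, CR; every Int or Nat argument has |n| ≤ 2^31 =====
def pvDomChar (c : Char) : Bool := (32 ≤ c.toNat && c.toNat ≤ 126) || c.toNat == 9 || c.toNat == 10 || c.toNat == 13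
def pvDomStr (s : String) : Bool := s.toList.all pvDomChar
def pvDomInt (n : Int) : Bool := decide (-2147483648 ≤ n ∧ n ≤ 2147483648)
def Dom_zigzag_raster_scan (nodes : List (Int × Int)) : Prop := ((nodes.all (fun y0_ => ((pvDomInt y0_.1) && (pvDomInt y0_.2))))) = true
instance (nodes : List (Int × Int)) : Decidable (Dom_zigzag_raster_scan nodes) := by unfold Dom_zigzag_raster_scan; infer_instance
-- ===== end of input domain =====

-- B replaces A's group-by-column table, per-column reversal and concatenation by ONE sort of
-- the nodes under a zig-zag comparison key (y negated in odd-ranked columns); return value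
-- only: both Pythons sort `nodes` in place the same way.


-- ===== PORT A =====
def zigzag_raster_scan (nodes : List (Int × Int)) : List (Int × Int) :=
  -- nodes.sort(key=lambda node: (node[0], node[1]))  (in-place; this file is about the return value)
  let s := PySem.List.sorted2 nodes (fun node => node.1) (fun node => node.2)
  -- columns = defaultdict(list); for x, y in nodes: columns[x].append((x, y))
  let columns := s.foldl (fun d p => d.modify p.1 [] (fun col => col ++ [(p.1, p.2)])) PySem.Dict.empty
  -- sorted(columns.items()): dict keys are distinct, so Python's tuple comparison never
  -- reaches the list component — it is exactly comparison on the key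
  let items := PySem.List.sorted columns.items (fun it => it.1)
  -- for i, (x, col_nodes) in enumerate(items): reverse on odd i ([::-1] is reverse,
  -- PySem.List.slice?_none_none_neg_one), zigzag_path.extend(col_nodes)
  (PySem.List.enumerate items).foldl
    (fun zigzag_path e =>
      zigzag_path ++ (if PySem.Int.mod e.1 2 == 1 then e.2.2.reverse else e.2.2)) []

-- ===== PORT B =====
def zigzag_raster_scan_alt (nodes : List (Int × Int)) : List (Int × Int) :=
  -- nodes.sort(key=lambda node: (node[0], node[1]))  (same in-place sort as A)
  let s := PySem.List.sorted2 nodes (fun node => node.1) (fun node => node.2)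
  -- xs = sorted({x for x, y in nodes})  (set consumed only by a keyless sorted: order-safe)
  let xs := PySem.List.sorted (PySem.Set.ofList (s.map (fun p => p.1))) (fun x => x)
  -- odd = {x: i % 2 for i, x in enumerate(xs)}
  let odd := (PySem.List.enumerate xs).foldl
    (fun d e => d.insert e.2 (PySem.Int.mod e.1 2)) PySem.Dict.empty
  -- sorted(nodes, key=lambda n: (n[0], -n[1] if odd[n[0]] else n[1]))
  -- (odd[n[0]] always hits — every n[0] is a key — so getD is exact; truthiness = ≠ 0)
  PySem.List.sorted2 s (fun n => n.1) (fun n => if odd.getD n.1 0 ≠ 0 then -n.2 else n.2)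

-- ===== PRECONDITION & SPEC =====
def Spec_zigzag_raster_scan (nodes : List (Int × Int)) (out : List (Int × Int)) : Prop := out = zigzag_raster_scan_alt nodes
instance (nodes : List (Int × Int)) (out : List (Int × Int)) : Decidable (Spec_zigzag_raster_scan nodes out) := by unfold Spec_zigzag_raster_scan; infer_instance

-- ===== CLAIM (what is proved, stated in full; the proofs are below) =====
def Claim_equal_zigzag_raster_scan : Prop := ∀ (nodes : List (Int × Int)), Dom_zigzag_raster_scan nodes → Spec_zigzag_raster_scan nodes (zigzag_raster_scan nodes)

-- ===== LEMMAS AND PROOFS =====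

-- the (key, column) association list of maximal equal-key runs, as A's grouping produces it
def chunkAssoc (s : List (Int × Int)) : List (Int × List (Int × Int)) :=
  match s with
  | [] => []
  | p :: rest =>
      (p.1, p :: rest.takeWhile (fun q => q.1 == p.1)) :: chunkAssoc (rest.dropWhile (fun q => q.1 == p.1))
termination_by s.length
decreasing_by
  simp only [List.length_cons]
  exact Nat.lt_succ_of_le (List.length_dropWhile_le _ _)

-- A's enumerate-and-extend loop over the chunks, as one recursion
def zigzagGroups (s : List (Int × Int)) (i : Int) : List (Int × Int) :=
  match s with
  | [] => []
  | p :: rest =>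
      let col := p :: rest.takeWhile (fun q => q.1 == p.1)
      let col' := if PySem.Int.mod i 2 == 1 then col.reverse else col
      col' ++ zigzagGroups (rest.dropWhile (fun q => q.1 == p.1)) (i + 1)
termination_by s.length
decreasing_by
  simp only [List.length_cons]
  exact Nat.lt_succ_of_le (List.length_dropWhile_le _ _)

-- defaultdict append 'columns[x].append(...)' is an insert of the updated value
theorem modify_eq_insert (d : PySem.Dict Int (List (Int × Int))) (k : Int)
    (f : List (Int × Int) → List (Int × Int)) :
    d.modify k [] f = d.insert k (f (d.getD k [])) := rfl

-- sorted2 with an Int-valued second key is sorting by the lexicographic pair key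
theorem sorted2_eq_sorted_lex (xs : List (Int × Int)) (k2 : Int × Int → Int) :
    PySem.List.sorted2 xs (fun n => n.1) k2 =
    PySem.List.sorted xs (fun p => toLex (p.1, k2 p)) := by
  rw [PySem.List.sorted_eq_foldl_insertBy]
  show xs.foldl (fun acc x => PySem.List.insertBy
      (fun a b => decide (a.1 < b.1) || (!decide (b.1 < a.1) && decide (k2 a < k2 b))) x acc) [] = _
  have hb : (fun (a b : Int × Int) => decide (a.1 < b.1) || (!decide (b.1 < a.1) && decide (k2 a < k2 b)))
      = fun (a b : Int × Int) => decide (toLex (a.1, k2 a) < toLex (b.1, k2 b)) := by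
    funext a b
    rcases lt_trichotomy a.1 b.1 with h | h | h
    · simp [Prod.Lex.lt_iff, h]
    · simp [Prod.Lex.lt_iff, h]
    · simp [Prod.Lex.lt_iff, not_lt_of_gt h, h.ne']
      exact fun h1 => absurd h (not_lt.mpr h1)
  rw [hb]

theorem hlex_of_sorted2 (xs : List (Int × Int)) :
    (PySem.List.sorted2 xs (fun n => n.1) (fun n => n.2)).Pairwise
      (fun a b => toLex (a.1, a.2) ≤ toLex (b.1, b.2)) := by
  rw [sorted2_eq_sorted_lex]
  exact PySem.List.sorted_pairwise (xs := xs) (key := fun p : Int × Int => toLex (p.1, p.2))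

theorem hmono_of_lex (s : List (Int × Int))
    (h : s.Pairwise (fun a b => toLex (a.1, a.2) ≤ toLex (b.1, b.2))) :
    s.Pairwise (fun a b => a.1 ≤ b.1) := by
  exact h.imp (fun hab => by
    rcases Prod.Lex.le_iff.mp hab with h1 | ⟨h1, _⟩
    · exact le_of_lt h1
    · exact le_of_eq h1)

theorem dropWhile_key_gt (k : Int) :
    ∀ (l : List (Int × Int)), l.Pairwise (fun a b => a.1 ≤ b.1) → (∀ q ∈ l, k ≤ q.1) →
    ∀ q ∈ l.dropWhile (fun q => q.1 == k), k < q.1 := by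
  intro l
  induction l with
  | nil => intro _ _ q hq; simp [List.dropWhile] at hq
  | cons a l ih =>
    intro hp hk q hq
    obtain ⟨hrel, htail⟩ := List.pairwise_cons.mp hp
    rw [List.dropWhile_cons] at hq
    split at hq
    · exact ih htail (fun r hr => hk r (List.mem_cons_of_mem _ hr)) q hq
    · next hcond =>
        have ha : a.1 ≠ k := by simpa using hcond
        have hak : k < a.1 := lt_of_le_of_ne (hk a (List.mem_cons_self ..)) (Ne.symm ha)
        rcases List.mem_cons.mp hq with rfl | hq'
        · exact hak
        · exact lt_of_lt_of_le hak (hrel q hq')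

-- fold of one chunk (all keys = k) on top of an insert at k
theorem foldl_chunk (k : Int) :
    ∀ (c : List (Int × Int)) (v : List (Int × Int)) (d : PySem.Dict Int (List (Int × Int))),
    (∀ q ∈ c, q.1 = k) →
    c.foldl (fun d p => d.modify p.1 [] (fun col => col ++ [(p.1, p.2)])) (d.insert k v) =
      d.insert k (v ++ c) := by
  intro c
  induction c with
  | nil => intro v d _; simp
  | cons q c ih =>
    intro v d hall
    obtain ⟨q1, q2⟩ := q
    have hq1 : q1 = k := hall (q1, q2) (List.mem_cons_self ..)
    subst hq1
    rw [List.foldl_cons]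
    have hstep : ((d.insert q1 v).modify q1 [] (fun col => col ++ [(q1, q2)]))
        = d.insert q1 (v ++ [(q1, q2)]) := by
      rw [modify_eq_insert, PySem.Dict.getD_insert_self, PySem.Dict.insert_insert_self]
    rw [hstep, ih (v ++ [(q1, q2)]) d (fun r hr => hall r (List.mem_cons_of_mem _ hr))]
    simp

theorem items_foldl_chunks :
    ∀ (s : List (Int × Int)) (d : PySem.Dict Int (List (Int × Int))),
    s.Pairwise (fun a b => a.1 ≤ b.1) → (∀ q ∈ s, d.contains q.1 = false) → d.keys.Nodup →
    (s.foldl (fun d p => d.modify p.1 [] (fun col => col ++ [(p.1, p.2)])) d).items =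
      d.items ++ chunkAssoc s
  | [], d, _, _, _ => by rw [chunkAssoc]; simp
  | p :: rest, d, hp, hfresh, hnd => by
    obtain ⟨hrel, htail⟩ := List.pairwise_cons.mp hp
    have hfr : d.contains p.1 = false := hfresh p (List.mem_cons_self ..)
    have hstep : d.modify p.1 [] (fun col => col ++ [(p.1, p.2)]) = d.insert p.1 [p] := by
      rw [modify_eq_insert, PySem.Dict.getD_of_not_contains d [] hfr]
      rfl
    have hgt : ∀ q ∈ rest.dropWhile (fun q => q.1 == p.1), p.1 < q.1 :=
      dropWhile_key_gt p.1 rest htail hrel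
    have ht : ∀ q ∈ rest.takeWhile (fun q => q.1 == p.1), q.1 = p.1 := by
      intro q hq
      have := List.mem_takeWhile_imp hq
      simpa using this
    have hchunk := foldl_chunk p.1 (rest.takeWhile (fun q => q.1 == p.1)) [p] d ht
    have hrec := items_foldl_chunks (rest.dropWhile (fun q => q.1 == p.1))
      (d.insert p.1 (p :: rest.takeWhile (fun q => q.1 == p.1)))
      (htail.sublist (List.dropWhile_sublist _))
      (by
        intro q hq
        have hne : (q.1 == p.1) = false := by simpa using (ne_of_gt (hgt q hq))
        have hq' : q ∈ rest := (List.dropWhile_sublist _).subset hq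
        rw [PySem.Dict.contains_insert]
        simp [hne, hfresh q (List.mem_cons_of_mem _ hq')])
      (PySem.Dict.nodup_keys_insert _ _ _ hnd)
    rw [List.foldl_cons, hstep,
      ← List.takeWhile_append_dropWhile (p := fun q => q.1 == p.1) (l := rest),
      List.foldl_append, hchunk]
    simp only [List.singleton_append]
    rw [List.takeWhile_append_dropWhile]
    rw [hrec, PySem.Dict.items_insert_of_not_contains _ _ hfr]
    rw [chunkAssoc]
    simp
termination_by s _ _ _ _ => s.length
decreasing_by
  simp only [List.length_cons]
  exact Nat.lt_succ_of_le (List.length_dropWhile_le _ _)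

theorem chunkAssoc_key_mem :
    ∀ (l : List (Int × Int)) (e : Int × List (Int × Int)), e ∈ chunkAssoc l → ∃ q ∈ l, e.1 = q.1
  | [], e, he => by rw [chunkAssoc] at he; simp at he
  | p :: rest, e, he => by
    rw [chunkAssoc] at he
    rcases List.mem_cons.mp he with rfl | he'
    · exact ⟨p, List.mem_cons_self .., rfl⟩
    · obtain ⟨q, hq, he2⟩ := chunkAssoc_key_mem (rest.dropWhile (fun q => q.1 == p.1)) e he'
      exact ⟨q, List.mem_cons_of_mem _ ((List.dropWhile_sublist _).subset hq), he2⟩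
termination_by l _ _ => l.length
decreasing_by
  simp only [List.length_cons]
  exact Nat.lt_succ_of_le (List.length_dropWhile_le _ _)

theorem chunkAssoc_pairwise :
    ∀ (s : List (Int × Int)), s.Pairwise (fun a b => a.1 ≤ b.1) →
    (chunkAssoc s).Pairwise (fun a b => a.1 < b.1)
  | [], _ => by rw [chunkAssoc]; exact List.Pairwise.nil
  | p :: rest, hp => by
    obtain ⟨hrel, htail⟩ := List.pairwise_cons.mp hp
    rw [chunkAssoc]
    refine List.pairwise_cons.mpr ⟨?_, chunkAssoc_pairwise _ (htail.sublist (List.dropWhile_sublist _))⟩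
    intro e he
    obtain ⟨q, hq, heq⟩ := chunkAssoc_key_mem _ e he
    have := dropWhile_key_gt p.1 rest htail hrel q hq
    simpa [heq] using this
termination_by s _ => s.length
decreasing_by
  simp only [List.length_cons]
  exact Nat.lt_succ_of_le (List.length_dropWhile_le _ _)

theorem foldl_enumerate_chunkAssoc :
    ∀ (s : List (Int × Int)) (i : Int) (acc : List (Int × Int)),
    (PySem.List.enumerate (chunkAssoc s) i).foldl
        (fun z e => z ++ (if PySem.Int.mod e.1 2 == 1 then e.2.2.reverse else e.2.2)) acc =
      acc ++ zigzagGroups s i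
  | [], i, acc => by
    rw [chunkAssoc, zigzagGroups]
    simp [PySem.List.enumerate_nil]
  | p :: rest, i, acc => by
    rw [chunkAssoc, zigzagGroups, PySem.List.enumerate_cons, List.foldl_cons,
      foldl_enumerate_chunkAssoc (rest.dropWhile (fun q => q.1 == p.1)) (i + 1) _]
    simp [List.append_assoc]
termination_by s _ _ => s.length
decreasing_by
  simp only [List.length_cons]
  exact Nat.lt_succ_of_le (List.length_dropWhile_le _ _)

-- ===== B-side lemmas =====

theorem zigzagGroups_perm :
    ∀ (s : List (Int × Int)) (i : Int), (zigzagGroups s i).Perm s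
  | [], i => by rw [zigzagGroups]
  | p :: rest, i => by
    rw [zigzagGroups]
    have hcol : (if PySem.Int.mod i 2 == 1
        then (p :: rest.takeWhile (fun q => q.1 == p.1)).reverse
        else p :: rest.takeWhile (fun q => q.1 == p.1)).Perm
        (p :: rest.takeWhile (fun q => q.1 == p.1)) := by
      split
      · exact List.reverse_perm _
      · exact List.Perm.refl _
    have h2 := hcol.append (zigzagGroups_perm (rest.dropWhile (fun q => q.1 == p.1)) (i + 1))
    have h3 : (p :: rest.takeWhile (fun q => q.1 == p.1)) ++ rest.dropWhile (fun q => q.1 == p.1)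
        = p :: rest := by
      rw [List.cons_append, List.takeWhile_append_dropWhile]
    exact h3 ▸ h2
termination_by s _ => s.length
decreasing_by
  simp only [List.length_cons]
  exact Nat.lt_succ_of_le (List.length_dropWhile_le _ _)

theorem mem_chunk_keys :
    ∀ (l : List (Int × Int)) (x : Int), x ∈ (chunkAssoc l).map (fun e => e.1) ↔ x ∈ l.map (fun q => q.1)
  | [], x => by rw [chunkAssoc]; simp
  | p :: rest, x => by
    rw [chunkAssoc]
    simp only [List.map_cons, List.mem_cons]
    rw [mem_chunk_keys (rest.dropWhile (fun q => q.1 == p.1)) x]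
    constructor
    · rintro (rfl | h)
      · exact Or.inl rfl
      · rcases List.mem_map.mp h with ⟨q, hq, rfl⟩
        exact Or.inr (List.mem_map.mpr ⟨q, (List.dropWhile_sublist _).subset hq, rfl⟩)
    · rintro (rfl | h)
      · exact Or.inl rfl
      · rcases List.mem_map.mp h with ⟨q, hq, rfl⟩
        rw [← List.takeWhile_append_dropWhile (p := fun q => q.1 == p.1) (l := rest)] at hq
        rcases List.mem_append.mp hq with hq | hq
        · exact Or.inl (by simpa using List.mem_takeWhile_imp hq)
        · exact Or.inr (List.mem_map.mpr ⟨q, hq, rfl⟩)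
termination_by l _ => l.length
decreasing_by
  simp only [List.length_cons]
  exact Nat.lt_succ_of_le (List.length_dropWhile_le _ _)

-- sorted({x for x,y in s}) is exactly the chunk keys of the fst-sorted s, in order
theorem sorted_ofList_eq_chunk_keys (s : List (Int × Int))
    (hm : s.Pairwise (fun a b => a.1 ≤ b.1)) :
    PySem.List.sorted (PySem.Set.ofList (s.map (fun p => p.1))) (fun x => x) =
      (chunkAssoc s).map (fun e => e.1) := by
  have hklt : ((chunkAssoc s).map (fun e => e.1)).Pairwise (fun a b => a < b) :=
    List.pairwise_map.mpr (chunkAssoc_pairwise s hm)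
  have hnd1 : ((chunkAssoc s).map (fun e => e.1)).Nodup := hklt.imp ne_of_lt
  have hperm : ((chunkAssoc s).map (fun e => e.1)).Perm
      (PySem.Set.ofList (s.map (fun p => p.1))) := by
    rw [List.perm_ext_iff_of_nodup hnd1 (PySem.Set.nodup_ofList _)]
    intro x
    rw [mem_chunk_keys, PySem.Set.mem_ofList]
  exact PySem.List.sorted_eq_of_perm_of_pairwise_lt _ _ _ hperm hklt

-- the parity dict built over a nodup key list: lookup of a key NOT in the list is unchanged
theorem getD_parity_notmem :
    ∀ (ks : List Int) (i : Int) (d : PySem.Dict Int Int) (x : Int), x ∉ ks →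
    ((PySem.List.enumerate ks i).foldl
        (fun d e => d.insert e.2 (PySem.Int.mod e.1 2)) d).getD x 0 = d.getD x 0 := by
  intro ks
  induction ks with
  | nil => intro i d x _; simp [PySem.List.enumerate_nil]
  | cons k t ih =>
    intro i d x hx
    have hxk : x ≠ k := fun h => hx (h ▸ List.mem_cons_self ..)
    have hxt : x ∉ t := fun h => hx (List.mem_cons_of_mem _ h)
    rw [PySem.List.enumerate_cons, List.foldl_cons]
    dsimp only
    rw [ih (i + 1) _ x hxt, PySem.Dict.getD_insert]
    simp [hxk]

-- and lookup of the j-th key gives the parity of i + j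
theorem getD_parity :
    ∀ (ks : List Int), ks.Nodup → ∀ (i : Int) (d : PySem.Dict Int Int) (j : Nat) (hj : j < ks.length),
    ((PySem.List.enumerate ks i).foldl
        (fun d e => d.insert e.2 (PySem.Int.mod e.1 2)) d).getD ks[j] 0 =
      PySem.Int.mod (i + j) 2 := by
  intro ks
  induction ks with
  | nil => intro _ _ _ j hj; simp at hj
  | cons k t ih =>
    intro hnd i d j hj
    obtain ⟨hk, hndt⟩ := List.nodup_cons.mp hnd
    rw [PySem.List.enumerate_cons, List.foldl_cons]
    dsimp only
    match j with
    | 0 =>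
      simp only [List.getElem_cons_zero]
      rw [getD_parity_notmem t (i + 1) _ k hk, PySem.Dict.getD_insert_self]
      norm_num
    | j + 1 =>
      simp only [List.getElem_cons_succ]
      rw [ih hndt (i + 1) _ j (by simpa using hj)]
      congr 1
      push_cast
      ring

-- elements of a column all share the head's x, and their y's ascend
theorem col_fst (p : Int × Int) (rest : List (Int × Int)) :
    ∀ q ∈ p :: rest.takeWhile (fun q => q.1 == p.1), q.1 = p.1 := by
  intro q hq
  rcases List.mem_cons.mp hq with rfl | hq'
  · rfl
  · simpa using List.mem_takeWhile_imp hq'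

-- the zig-zag concatenation is sorted under the zig-zag key, given correct chunk parities
theorem zig_pairwise (f : Int → Int) :
    ∀ (s : List (Int × Int)) (i : Int),
    s.Pairwise (fun a b => toLex (a.1, a.2) ≤ toLex (b.1, b.2)) →
    (∀ (j : Nat) (hj : j < (chunkAssoc s).length), f ((chunkAssoc s)[j].1) = PySem.Int.mod (i + j) 2) →
    (zigzagGroups s i).Pairwise (fun a b =>
      toLex (a.1, if f a.1 ≠ 0 then -a.2 else a.2) ≤ toLex (b.1, if f b.1 ≠ 0 then -b.2 else b.2))
  | [], i, _, _ => by rw [zigzagGroups]; exact List.Pairwise.nil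
  | p :: rest, i, hlex, hpar => by
    rw [zigzagGroups]
    have hm := hmono_of_lex _ hlex
    obtain ⟨hrel, htail⟩ := List.pairwise_cons.mp hm
    obtain ⟨_, htaillex⟩ := List.pairwise_cons.mp hlex
    have hcs : chunkAssoc (p :: rest) =
        (p.1, p :: rest.takeWhile (fun q => q.1 == p.1)) ::
          chunkAssoc (rest.dropWhile (fun q => q.1 == p.1)) := by rw [chunkAssoc]
    have hf0 : f p.1 = PySem.Int.mod i 2 := by
      have h := hpar 0 (by rw [hcs]; simp)
      simp only [hcs, List.getElem_cons_zero] at h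
      simpa using h
    -- column facts
    have hcolsub : (p :: rest.takeWhile (fun q => q.1 == p.1)).Sublist (p :: rest) :=
      List.Sublist.cons₂ _ (List.takeWhile_sublist _)
    have hcollex : (p :: rest.takeWhile (fun q => q.1 == p.1)).Pairwise
        (fun a b => toLex (a.1, a.2) ≤ toLex (b.1, b.2)) := hlex.sublist hcolsub
    have hcoly : (p :: rest.takeWhile (fun q => q.1 == p.1)).Pairwise (fun a b => a.2 ≤ b.2) := by
      refine hcollex.imp_of_mem ?_
      intro a b ha hb hab
      have ha1 := col_fst p rest a ha
      have hb1 := col_fst p rest b hb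
      rcases Prod.Lex.le_iff.mp hab with h1 | ⟨_, h2⟩
      · exact absurd (ha1.trans hb1.symm) (ne_of_lt h1)
      · exact h2
    -- pairwise inside the (possibly reversed) column
    have hcol' : (if PySem.Int.mod i 2 == 1
        then (p :: rest.takeWhile (fun q => q.1 == p.1)).reverse
        else p :: rest.takeWhile (fun q => q.1 == p.1)).Pairwise (fun a b =>
        toLex (a.1, if f a.1 ≠ 0 then -a.2 else a.2) ≤ toLex (b.1, if f b.1 ≠ 0 then -b.2 else b.2)) := by
      split
      · next hodd =>
        have h1 : f p.1 = 1 := by rw [hf0]; simpa using hodd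
        rw [List.pairwise_reverse]
        refine hcoly.imp_of_mem ?_
        intro a b ha hb hab
        rw [col_fst p rest a ha, col_fst p rest b hb, h1]
        simp only [ne_eq, one_ne_zero, not_false_eq_true, if_true]
        exact Prod.Lex.le_iff.mpr (Or.inr ⟨rfl, by simpa using neg_le_neg hab⟩)
      · next heven =>
        have h0 : f p.1 = 0 := by
          rw [hf0]
          rcases PySem.Int.mod_two_eq i with h | h
          · exact h
          · exact absurd (by simpa using h) heven
        refine hcoly.imp_of_mem ?_
        intro a b ha hb hab
        rw [col_fst p rest a ha, col_fst p rest b hb, h0]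
        simp only [ne_eq, not_true_eq_false]
        exact Prod.Lex.le_iff.mpr (Or.inr ⟨rfl, by simpa using hab⟩)
    -- recursive part
    have hrec := zig_pairwise f (rest.dropWhile (fun q => q.1 == p.1)) (i + 1)
      (htaillex.sublist (List.dropWhile_sublist _))
      (by
        intro j hj
        have h := hpar (j + 1) (by rw [hcs]; simpa using Nat.succ_lt_succ hj)
        simp only [hcs, List.getElem_cons_succ] at h
        rw [h]
        congr 1
        push_cast
        ring)
    -- cross inequalities
    refine List.pairwise_append.mpr ⟨hcol', hrec, ?_⟩
    intro a ha b hb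
    have ha1 : a.1 = p.1 := by
      have : a ∈ p :: rest.takeWhile (fun q => q.1 == p.1) := by
        split at ha
        · exact List.mem_reverse.mp ha
        · exact ha
      exact col_fst p rest a this
    have hb1 : p.1 < b.1 := by
      have hbmem : b ∈ rest.dropWhile (fun q => q.1 == p.1) :=
        (zigzagGroups_perm _ _).subset hb
      exact dropWhile_key_gt p.1 rest htail hrel b hbmem
    exact le_of_lt (Prod.Lex.lt_iff.mpr (Or.inl (by rw [ha1]; exact hb1)))
termination_by s _ _ _ => s.length
decreasing_by
  simp only [List.length_cons]
  exact Nat.lt_succ_of_le (List.length_dropWhile_le _ _)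

-- ===== VERDICT (by name: the statement is the Claim_ definition above) =====
theorem zigzag_raster_scan_spec : Claim_equal_zigzag_raster_scan := by
  intro nodes _
  unfold Spec_zigzag_raster_scan zigzag_raster_scan zigzag_raster_scan_alt
  have hlex := hlex_of_sorted2 nodes
  set s := PySem.List.sorted2 nodes (fun n => n.1) (fun n => n.2) with hs
  have hm := hmono_of_lex s hlex
  -- A's side reduces to the zig-zag chunk concatenation
  have hitems :
      (s.foldl (fun d p => d.modify p.1 [] (fun col => col ++ [(p.1, p.2)])) PySem.Dict.empty).items
        = chunkAssoc s := by
    have := items_foldl_chunks s PySem.Dict.empty hm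
      (by intro q _; simp [PySem.Dict.contains_empty]) (by simp [PySem.Dict.keys_empty])
    simpa using this
  have hsorted :
      PySem.List.sorted (chunkAssoc s) (fun it : Int × List (Int × Int) => it.1) = chunkAssoc s :=
    PySem.List.sorted_eq_of_perm_of_pairwise_lt _ _ _ (List.Perm.refl _)
      (chunkAssoc_pairwise s hm)
  have hA : (PySem.List.enumerate (PySem.List.sorted
        (s.foldl (fun d p => d.modify p.1 [] (fun col => col ++ [(p.1, p.2)]))
          PySem.Dict.empty).items (fun it => it.1))).foldl
      (fun z e => z ++ (if PySem.Int.mod e.1 2 == 1 then e.2.2.reverse else e.2.2)) []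
      = zigzagGroups s 0 := by
    rw [hitems, hsorted]
    simpa using foldl_enumerate_chunkAssoc s 0 []
  rw [hA]
  dsimp only
  -- B's side: its parity dict reads the chunk-index parity at every key of s
  set ks := (chunkAssoc s).map (fun e => e.1) with hks
  rw [sorted_ofList_eq_chunk_keys s hm]
  set odd := (PySem.List.enumerate ks).foldl
    (fun d e => d.insert e.2 (PySem.Int.mod e.1 2)) PySem.Dict.empty with hodd
  have hpar : ∀ (j : Nat) (hj : j < (chunkAssoc s).length),
      odd.getD ((chunkAssoc s)[j].1) 0 = PySem.Int.mod ((0 : Int) + j) 2 := by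
    intro j hj
    have hjk : j < ks.length := by simpa [hks] using hj
    have hkj : ks[j] = (chunkAssoc s)[j].1 := by simp [hks]
    have hknd : ks.Nodup :=
      (List.pairwise_map.mpr (chunkAssoc_pairwise s hm)).imp ne_of_lt
    rw [← hkj, hodd]
    exact getD_parity ks hknd 0 PySem.Dict.empty j hjk
  -- one sort under the zig-zag key equals the zig-zag concatenation
  rw [sorted2_eq_sorted_lex s (fun n => if odd.getD n.1 0 ≠ 0 then -n.2 else n.2)]
  refine (PySem.List.eq_of_perm_of_pairwise_le_of_injective
    (key := fun p : Int × Int => toLex (p.1, if odd.getD p.1 0 ≠ 0 then -p.2 else p.2))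
    ?_ ?_ ?_ ?_).symm
  · intro a b hab
    have hab' : (a.1, if odd.getD a.1 0 ≠ 0 then -a.2 else a.2)
        = (b.1, if odd.getD b.1 0 ≠ 0 then -b.2 else b.2) := congrArg ofLex hab
    obtain ⟨h1, h2⟩ := Prod.mk.inj hab'
    rw [h1] at h2
    refine Prod.ext h1 ?_
    by_cases hc : odd.getD b.1 0 ≠ 0
    · rw [if_pos hc, if_pos hc] at h2; omega
    · rw [if_neg hc, if_neg hc] at h2; exact h2
  · exact (PySem.List.sorted_perm ..).trans (zigzagGroups_perm s 0).symm
  · exact PySem.List.sorted_pairwise ..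
  · exact zig_pairwise (fun x => odd.getD x 0) s 0 hlex hpar
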